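-- pv_equiv track=rewrite | github.com/ract93/Morphanimals | Evo Island/py/environment.py | generate_petri_dish
-- ===== SOURCE A (Python) =====
-- def generate_petri_dish(n):
--     """West→east difficulty gradient (levels 1-5), mirroring LTEE-style pressure."""
--     if n <= 0:
--         return []
--
--     array = [[0] * n for _ in range(n)]
--     increment = 4 / (n - 1) if n > 1 else 0
--
--     for i in range(n):
--         for j in range(n):
--             array[i][j] = round((j * increment) + 1)
--
--     return array
-- ===== SOURCE B (Python) =====
-- def generate_petri_dish(n):
--     """West→east difficulty gradient (levels 1-5), mirroring LTEE-style pressure."""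
--     if n <= 0:
--         return []
--     increment = 4 / (n - 1) if n > 1 else 0
--
--     def level(j):
--         return round(j * increment + 1)
--
--     # The gradient is non-decreasing along a row, so locate each run of equal
--     # levels by binary search instead of evaluating every cell.
--     row = []
--     start = 0
--     while start < n:
--         v = level(start)
--         lo, hi = start, n
--         while hi - lo > 1:
--             mid = (lo + hi) // 2
--             if level(mid) == v:
--                 lo = mid
--             else:
--                 hi = mid
--         row.extend([v] * (hi - start))
--         start = hi
--     return [row[:] for _ in range(n)]
-- ===== Notes on version B (the rewrite author's own statement) =====
-- stated objective: alternative
-- what changed: The row gradient is non-decreasing with at most 5 distinct levels, so B finds each run of equal levels by binary search (O(log n) level evaluations per run) and emits it with replication, then replicates the row n times, instead of A's nested loop that evaluates round(j*increment+1) for every one of the n*n cells of a pre-built zero grid.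
import Mathlib
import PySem

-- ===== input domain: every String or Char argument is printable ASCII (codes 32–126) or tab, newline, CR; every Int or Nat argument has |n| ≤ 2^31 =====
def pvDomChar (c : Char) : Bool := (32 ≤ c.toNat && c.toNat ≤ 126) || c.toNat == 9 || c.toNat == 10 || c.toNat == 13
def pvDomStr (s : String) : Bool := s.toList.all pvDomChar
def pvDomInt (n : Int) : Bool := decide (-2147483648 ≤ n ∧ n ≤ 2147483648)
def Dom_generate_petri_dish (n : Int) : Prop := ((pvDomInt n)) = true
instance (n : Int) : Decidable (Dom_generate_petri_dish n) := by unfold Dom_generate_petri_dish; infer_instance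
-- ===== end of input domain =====

-- B locates each run of equal gradient levels by binary search (the row is
-- non-decreasing), emits runs by replication and replicates the row n times,
-- instead of A's nested loop assigning round(j*increment+1) to every cell of a
-- zero grid. Python float arithmetic (4/(n-1), j*inc, +1, round) is modelled
-- exactly by pvFl/pvRNE: correctly-rounded IEEE-754 binary64 ops on rationals
-- (all values here are normal doubles).


-- ===== PORT A =====
-- shared float semantics: round-half-even to an integer (Python's round on a float;
-- exact, since the argument is the double's exact rational value)
def pvRNE (x : ℚ) : ℤ :=
  let f : ℤ := ⌊x⌋
  let r : ℚ := x - f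
  if r > 1/2 then f + 1 else if r < 1/2 then f else if f % 2 = 0 then f else f + 1

-- fl: round a rational to the nearest IEEE binary64 double (ties to even), returned as
-- a rational; exact for the normal, non-overflowing values these programs produce
def pvFl (x : ℚ) : ℚ :=
  if x = 0 then 0
  else
    let e : ℤ := Int.log 2 |x| - 52
    (pvRNE (x * (2:ℚ) ^ (-e)) : ℚ) * (2:ℚ) ^ e

def generate_petri_dish (n : Int) : List (List Int) :=
  if n ≤ 0 then []
  else
    -- array = [[0] * n for _ in range(n)]
    let array : List (List Int) := (List.range n.toNat).map (fun _ => List.replicate n.toNat 0)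
    -- increment = 4 / (n - 1) if n > 1 else 0   (one float division)
    let increment : ℚ := if n > 1 then pvFl (4 / ((n : ℚ) - 1)) else 0
    -- for i in range(n): for j in range(n): array[i][j] = round((j * increment) + 1)
    (PySem.List.pyRange 0 n 1).foldl (fun a i =>
      (PySem.List.pyRange 0 n 1).foldl (fun a j =>
        PySem.List.pySetD a i
          (PySem.List.pySetD (PySem.List.pyGetD a i [])
            j (pvRNE (pvFl (pvFl ((j : ℚ) * increment) + 1))))) a) array

-- ===== PORT B =====
-- def level(j): return round(j * increment + 1)
def pvLevel (inc : ℚ) (j : Int) : Int := pvRNE (pvFl (pvFl ((j : ℚ) * inc) + 1))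

-- inner while loop: lo, hi = start, n; while hi - lo > 1: …
-- (fuel = the loop's decreasing measure (hi-lo).toNat; with that fuel the guard
--  'fuel = 0' is never the reason the loop stops, it only makes the recursion structural)
def pvBisectF : ℕ → ℚ → Int → Int → Int → Int × Int
  | 0, _, _, lo, hi => (lo, hi)
  | f + 1, inc, v, lo, hi =>
    if hi - lo > 1 then
      let mid := PySem.Int.floordiv (lo + hi) 2
      if pvLevel inc mid = v then pvBisectF f inc v mid hi else pvBisectF f inc v lo mid
    else (lo, hi)

def pvBisect (inc : ℚ) (v : Int) (lo hi : Int) : Int × Int :=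
  pvBisectF (hi - lo).toNat inc v lo hi

-- outer while loop: start = 0; while start < n: … row.extend([v]*(hi-start)); start = hi
-- (fuel = (n-start).toNat, again only to make the recursion structural)
def pvBuildRowF : ℕ → ℚ → Int → Int → List Int
  | 0, _, _, _ => []
  | f + 1, inc, n, start =>
    if start < n then
      let v := pvLevel inc start
      let p := pvBisect inc v start n
      List.replicate (p.2 - start).toNat v ++ pvBuildRowF f inc n p.2
    else []

def pvBuildRow (inc : ℚ) (n start : Int) : List Int :=
  pvBuildRowF (n - start).toNat inc n start

def generate_petri_dish_alt (n : Int) : List (List Int) :=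
  if n ≤ 0 then []
  else
    let increment : ℚ := if n > 1 then pvFl (4 / ((n : ℚ) - 1)) else 0
    let row : List Int := pvBuildRow increment n 0
    -- return [row[:] for _ in range(n)]
    (PySem.List.pyRange 0 n 1).map (fun _ => row)

-- ===== PRECONDITION & SPEC =====
def Spec_generate_petri_dish (n : Int) (out : List (List Int)) : Prop := out = generate_petri_dish_alt n
instance (n : Int) (out : List (List Int)) : Decidable (Spec_generate_petri_dish n out) := by unfold Spec_generate_petri_dish; infer_instance

-- ===== CLAIM (what is proved, stated in full; the proofs are below) =====
def Claim_equal_generate_petri_dish : Prop := ∀ (n : Int), Dom_generate_petri_dish n → Spec_generate_petri_dish n (generate_petri_dish n)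

-- ===== LEMMAS AND PROOFS =====

-- A-side: writing g i into every slot i < k of a list of length ≥ k
theorem pvFoldSet {α : Type} (g : ℕ → α) :
    ∀ (k : ℕ) (l : List α), k ≤ l.length →
      (List.range k).foldl (fun l i => l.set i (g i)) l = (List.range k).map g ++ l.drop k := by
  intro k
  induction k with
  | zero => intro l _; simp
  | succ k ih =>
    intro l hk
    rw [List.range_succ, List.foldl_append, ih l (Nat.le_of_succ_le hk)]
    simp only [List.foldl_cons, List.foldl_nil, List.map_append, List.map_cons, List.map_nil]
    rw [List.set_append]
    have hlen : ((List.range k).map g).length = k := by simp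
    rw [hlen]
    simp only [lt_irrefl, if_false, Nat.sub_self]
    rw [List.drop_eq_getElem_cons (by omega : k < l.length), List.set_cons_zero]
    simp [List.append_assoc]

-- A-side: the inner loop only rewrites row i of the grid
theorem pvGridInner (g : ℕ → Int) (i : ℕ) :
    ∀ (k : ℕ) (a : List (List Int)), i < a.length →
      (List.range k).foldl (fun a j => a.set i ((a.getD i []).set j (g j))) a
        = a.set i ((List.range k).foldl (fun r j => r.set j (g j)) (a.getD i [])) := by
  intro k
  induction k with
  | zero =>
    intro a hi
    simp only [List.range_zero, List.foldl_nil]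
    rw [List.getD_eq_getElem _ _ hi, List.set_getElem_self hi]
  | succ k ih =>
    intro a hi
    rw [List.range_succ, List.foldl_append, ih a hi]
    simp only [List.foldl_cons, List.foldl_nil, List.foldl_append]
    have h1 : (a.set i ((List.range k).foldl (fun r j => r.set j (g j)) (a.getD i []))).getD i []
        = (List.range k).foldl (fun r j => r.set j (g j)) (a.getD i []) := by
      rw [List.getD_eq_getElem _ _ (by simpa using hi)]
      simp
    rw [h1, List.set_set]

-- A-side: the outer loop fills the first k rows with the gradient row
theorem pvGridOuter (g : ℕ → Int) (N : ℕ) :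
    ∀ (k : ℕ) (a : List (List Int)), (∀ r ∈ a, r.length = N) → k ≤ a.length →
      (List.range k).foldl (fun a i =>
          (List.range N).foldl (fun a j => a.set i ((a.getD i []).set j (g j))) a) a
        = (List.range k).map (fun _ => (List.range N).map g) ++ a.drop k := by
  intro k
  induction k with
  | zero => intro a _ _; simp
  | succ k ih =>
    intro a hrows hk
    rw [List.range_succ, List.foldl_append, ih a hrows (Nat.le_of_succ_le hk)]
    simp only [List.foldl_cons, List.foldl_nil]
    set b := (List.range k).map (fun _ => (List.range N).map g) ++ a.drop k with hb
    have hblen : b.length = a.length := by simp [hb]; omega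
    have hkb : k < b.length := by omega
    have h? : b[k]? = some (a[k]'(by omega)) := by
      rw [hb, List.getElem?_append_right (by simp)]
      simp [List.getElem?_drop]
    have hbrow : b.getD k [] = a[k]'(by omega) := by
      rw [List.getD_eq_getElem?_getD, h?]; rfl
    have hrowlen : (b.getD k []).length = N := by
      rw [hbrow]; exact hrows _ (List.getElem_mem _)
    rw [pvGridInner g k N b hkb]
    rw [pvFoldSet g N (b.getD k []) (by omega)]
    rw [List.drop_eq_nil_of_le (by omega), List.append_nil]
    rw [hb, List.set_append]
    have hlen : ((List.range k).map fun _ => (List.range N).map g).length = k := by simp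
    rw [hlen]
    simp only [lt_irrefl, if_false, Nat.sub_self]
    rw [List.drop_eq_getElem_cons (by omega : k < a.length), List.set_cons_zero]
    simp [List.append_assoc]

-- A-side: zero grid fully overwritten column-wise = the gradient row replicated
theorem pvMain (g : ℕ → ℤ) (N : ℕ) :
    (List.range N).foldl (fun a i =>
        (List.range N).foldl (fun a j => a.set i ((a.getD i []).set j (g j))) a)
      (List.map (fun _ => List.replicate N (0:ℤ)) (List.range N))
    = List.map (fun _ => List.map g (List.range N)) (List.range N) := by
  rw [pvGridOuter g N N ((List.range N).map (fun _ => List.replicate N (0:ℤ)))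
      (by intro r hr; simp at hr; obtain ⟨-, rfl⟩ := hr; simp)
      (by simp)]
  simp

-- ---- monotonicity of the gradient ----

theorem pvRNE_eq (x : ℚ) : pvRNE x =
    if x - ⌊x⌋ > 1/2 then ⌊x⌋ + 1 else if x - ⌊x⌋ < 1/2 then ⌊x⌋
    else if ⌊x⌋ % 2 = 0 then ⌊x⌋ else ⌊x⌋ + 1 := rfl

theorem pvRNE_le (x : ℚ) : (pvRNE x : ℚ) ≤ x + 1/2 := by
  rw [pvRNE_eq]
  have h1 := Int.floor_le x
  have h2 := Int.lt_floor_add_one x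
  split_ifs <;> push_cast <;> linarith

theorem le_pvRNE (x : ℚ) : x - 1/2 ≤ (pvRNE x : ℚ) := by
  rw [pvRNE_eq]
  have h1 := Int.floor_le x
  have h2 := Int.lt_floor_add_one x
  split_ifs <;> push_cast <;> linarith

theorem pvRNE_mono {x y : ℚ} (h : x ≤ y) : pvRNE x ≤ pvRNE y := by
  have hf : ⌊x⌋ ≤ ⌊y⌋ := Int.floor_le_floor h
  by_cases hlt : ⌊x⌋ < ⌊y⌋
  · have hx : pvRNE x ≤ ⌊x⌋ + 1 := by rw [pvRNE_eq]; split_ifs <;> omega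
    have hy : ⌊y⌋ ≤ pvRNE y := by rw [pvRNE_eq]; split_ifs <;> omega
    omega
  · have hfe : ⌊y⌋ = ⌊x⌋ := by omega
    rw [pvRNE_eq, pvRNE_eq, hfe]
    split_ifs <;> first | omega | linarith

theorem pvFl_def_pos {x : ℚ} (hx : 0 < x) :
    pvFl x = (pvRNE (x * (2:ℚ) ^ (52 - Int.log 2 x)) : ℚ) * (2:ℚ) ^ (Int.log 2 x - 52) := by
  unfold pvFl
  rw [if_neg (by positivity), abs_of_pos hx]
  ring_nf

theorem pvRNE_scaled_lb {x : ℚ} (hx : 0 < x) :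
    (2:ℚ) ^ (52:ℤ) ≤ (pvRNE (x * (2:ℚ) ^ (52 - Int.log 2 x)) : ℚ) := by
  have hlow : (2:ℚ) ^ (Int.log 2 x) ≤ x := Int.zpow_log_le_self (by norm_num) hx
  have hz : (2:ℚ) ^ (52:ℤ) ≤ x * (2:ℚ) ^ (52 - Int.log 2 x) := by
    calc (2:ℚ) ^ (52:ℤ) = (2:ℚ) ^ (Int.log 2 x) * (2:ℚ) ^ (52 - Int.log 2 x) := by
          rw [← zpow_add₀ (by norm_num : (2:ℚ) ≠ 0)]; congr 1; ring
      _ ≤ x * (2:ℚ) ^ (52 - Int.log 2 x) := by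
          apply mul_le_mul_of_nonneg_right hlow (by positivity)
  have h1 := le_pvRNE (x * (2:ℚ) ^ (52 - Int.log 2 x))
  have h2 : ((2:ℚ) ^ (52:ℤ) : ℚ) = ((2 ^ 52 : ℤ) : ℚ) := by
    rw [show (52:ℤ) = ((52:ℕ):ℤ) from rfl, zpow_natCast]; push_cast; ring
  have : ((2 ^ 52 : ℤ) : ℚ) - 1 < (pvRNE (x * (2:ℚ) ^ (52 - Int.log 2 x)) : ℚ) := by
    rw [← h2]; linarith
  have : (2 ^ 52 : ℤ) - 1 < pvRNE (x * (2:ℚ) ^ (52 - Int.log 2 x)) := by exact_mod_cast this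
  rw [h2]; exact_mod_cast this

theorem pvRNE_scaled_ub {x : ℚ} (_hx : 0 < x) :
    (pvRNE (x * (2:ℚ) ^ (52 - Int.log 2 x)) : ℚ) ≤ (2:ℚ) ^ (53:ℤ) := by
  have hhigh : x < (2:ℚ) ^ (Int.log 2 x + 1) := Int.lt_zpow_succ_log_self (by norm_num) x
  have hz : x * (2:ℚ) ^ (52 - Int.log 2 x) < (2:ℚ) ^ (53:ℤ) := by
    calc x * (2:ℚ) ^ (52 - Int.log 2 x) < (2:ℚ) ^ (Int.log 2 x + 1) * (2:ℚ) ^ (52 - Int.log 2 x) := by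
          apply mul_lt_mul_of_pos_right hhigh (by positivity)
      _ = (2:ℚ) ^ (53:ℤ) := by rw [← zpow_add₀ (by norm_num : (2:ℚ) ≠ 0)]; congr 1; ring
  have h1 := pvRNE_le (x * (2:ℚ) ^ (52 - Int.log 2 x))
  have h2 : ((2:ℚ) ^ (53:ℤ) : ℚ) = ((2 ^ 53 : ℤ) : ℚ) := by
    rw [show (53:ℤ) = ((53:ℕ):ℤ) from rfl, zpow_natCast]; push_cast; ring
  have : (pvRNE (x * (2:ℚ) ^ (52 - Int.log 2 x)) : ℚ) < ((2 ^ 53 : ℤ) : ℚ) + 1 := by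
    rw [← h2]; linarith
  have : pvRNE (x * (2:ℚ) ^ (52 - Int.log 2 x)) < (2 ^ 53 : ℤ) + 1 := by exact_mod_cast this
  rw [h2]; exact_mod_cast (by omega : pvRNE (x * (2:ℚ) ^ (52 - Int.log 2 x)) ≤ (2 ^ 53 : ℤ))

theorem pvFl_lb {x : ℚ} (hx : 0 < x) : (2:ℚ) ^ (Int.log 2 x) ≤ pvFl x := by
  rw [pvFl_def_pos hx]
  calc (2:ℚ) ^ (Int.log 2 x) = (2:ℚ) ^ (52:ℤ) * (2:ℚ) ^ (Int.log 2 x - 52) := by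
        rw [← zpow_add₀ (by norm_num : (2:ℚ) ≠ 0)]; congr 1; ring
    _ ≤ _ := mul_le_mul_of_nonneg_right (pvRNE_scaled_lb hx) (by positivity)

theorem pvFl_ub {x : ℚ} (hx : 0 < x) : pvFl x ≤ (2:ℚ) ^ (Int.log 2 x + 1) := by
  rw [pvFl_def_pos hx]
  calc (pvRNE (x * (2:ℚ) ^ (52 - Int.log 2 x)) : ℚ) * (2:ℚ) ^ (Int.log 2 x - 52)
      ≤ (2:ℚ) ^ (53:ℤ) * (2:ℚ) ^ (Int.log 2 x - 52) :=
        mul_le_mul_of_nonneg_right (pvRNE_scaled_ub hx) (by positivity)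
    _ = (2:ℚ) ^ (Int.log 2 x + 1) := by rw [← zpow_add₀ (by norm_num : (2:ℚ) ≠ 0)]; congr 1; ring

theorem pvFl_nonneg {x : ℚ} (hx : 0 ≤ x) : 0 ≤ pvFl x := by
  rcases eq_or_lt_of_le hx with h | h
  · simp [pvFl, ← h]
  · exact le_trans (by positivity) (pvFl_lb h)

theorem pvFl_mono {x y : ℚ} (hx : 0 ≤ x) (hxy : x ≤ y) : pvFl x ≤ pvFl y := by
  rcases eq_or_lt_of_le hx with h | hxp
  · rw [← h]; simpa [pvFl] using pvFl_nonneg (le_trans hx hxy)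
  · have hyp : 0 < y := lt_of_lt_of_le hxp hxy
    have hlog : Int.log 2 x ≤ Int.log 2 y := Int.log_mono_right hxp hxy
    rcases lt_or_eq_of_le hlog with hlt | heq
    · calc pvFl x ≤ (2:ℚ) ^ (Int.log 2 x + 1) := pvFl_ub hxp
        _ ≤ (2:ℚ) ^ (Int.log 2 y) := zpow_le_zpow_right₀ (by norm_num) (by omega)
        _ ≤ pvFl y := pvFl_lb hyp
    · rw [pvFl_def_pos hxp, pvFl_def_pos hyp, ← heq]
      apply mul_le_mul_of_nonneg_right _ (by positivity)
      exact_mod_cast pvRNE_mono (mul_le_mul_of_nonneg_right hxy (by positivity))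

theorem pvLevel_mono {inc : ℚ} (hinc : 0 ≤ inc) {a b : Int} (ha : 0 ≤ a) (hab : a ≤ b) :
    pvLevel inc a ≤ pvLevel inc b := by
  unfold pvLevel
  have h0 : (0:ℚ) ≤ (a:ℚ) * inc := mul_nonneg (by exact_mod_cast ha) hinc
  have h1 : (a:ℚ) * inc ≤ (b:ℚ) * inc :=
    mul_le_mul_of_nonneg_right (by exact_mod_cast hab) hinc
  have h2 := pvFl_mono h0 h1
  have h3 : (0:ℚ) ≤ pvFl ((a:ℚ) * inc) + 1 := by
    have := pvFl_nonneg h0; linarith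
  exact pvRNE_mono (pvFl_mono h3 (by linarith))

-- the binary search keeps level(lo) = v
theorem pvBisectF_bounds (inc : ℚ) (v : Int) :
    ∀ (f : ℕ) (lo hi : Int), (hi - lo).toNat ≤ f → lo < hi →
      lo ≤ (pvBisectF f inc v lo hi).1 ∧
        (pvBisectF f inc v lo hi).2 = (pvBisectF f inc v lo hi).1 + 1 ∧
        (pvBisectF f inc v lo hi).2 ≤ hi := by
  intro f
  induction f with
  | zero => intro lo hi hk hlt; omega
  | succ f ih =>
    intro lo hi hk hlt
    simp only [pvBisectF]
    by_cases hgt : hi - lo > 1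
    · rw [if_pos hgt]
      have hdiv := PySem.Int.floordiv_eq_ediv_of_pos (a := lo + hi) (b := 2) (by omega)
      by_cases heq : pvLevel inc (PySem.Int.floordiv (lo + hi) 2) = v
      · rw [if_pos heq]
        have := ih (PySem.Int.floordiv (lo + hi) 2) hi (by omega) (by omega)
        omega
      · rw [if_neg heq]
        have := ih lo (PySem.Int.floordiv (lo + hi) 2) (by omega) (by omega)
        omega
    · rw [if_neg hgt]
      omega

theorem pvBisectF_level (inc : ℚ) (v : Int) :
    ∀ (f : ℕ) (lo hi : Int), pvLevel inc lo = v →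
      pvLevel inc (pvBisectF f inc v lo hi).1 = v := by
  intro f
  induction f with
  | zero => intro lo hi hv; exact hv
  | succ f ih =>
    intro lo hi hv
    simp only [pvBisectF]
    by_cases hgt : hi - lo > 1
    · rw [if_pos hgt]
      by_cases heq : pvLevel inc (PySem.Int.floordiv (lo + hi) 2) = v
      · rw [if_pos heq]; exact ih _ hi heq
      · rw [if_neg heq]; exact ih lo _ hv
    · rw [if_neg hgt]; exact hv

theorem pvBisect_bounds (inc : ℚ) (v : Int) (lo hi : Int) (hlt : lo < hi) :
    lo ≤ (pvBisect inc v lo hi).1 ∧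
      (pvBisect inc v lo hi).2 = (pvBisect inc v lo hi).1 + 1 ∧
      (pvBisect inc v lo hi).2 ≤ hi :=
  pvBisectF_bounds inc v (hi - lo).toNat lo hi le_rfl hlt

theorem pvBisect_level (inc : ℚ) (v : Int) (lo hi : Int) (hv : pvLevel inc lo = v) :
    pvLevel inc (pvBisect inc v lo hi).1 = v :=
  pvBisectF_level inc v (hi - lo).toNat lo hi hv

-- run reconstruction: with a monotone level function the row equals the direct map
theorem pvBuildRowF_eq (inc : ℚ) (n : Int)
    (hm : ∀ a b : Int, 0 ≤ a → a ≤ b → pvLevel inc a ≤ pvLevel inc b) :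
    ∀ (f : ℕ) (start : Int), 0 ≤ start → (n - start).toNat ≤ f →
      pvBuildRowF f inc n start
        = (List.range (n - start).toNat).map (fun (j : ℕ) => pvLevel inc (start + (j : Int))) := by
  intro f
  induction f with
  | zero =>
    intro start h0 hk
    simp [pvBuildRowF, show (n - start).toNat = 0 by omega]
  | succ f ih =>
    intro start h0 hk
    simp only [pvBuildRowF]
    by_cases hlt : start < n
    · rw [if_pos hlt]
      set v := pvLevel inc start with hvdef
      have hb := pvBisect_bounds inc v start n hlt
      have hbl := pvBisect_level inc v start n rfl
      set p := pvBisect inc v start n with hpdef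
      obtain ⟨hlo, hsucc, hhi⟩ := hb
      have hrec := ih p.2 (by omega) (by omega)
      rw [hrec]
      have hsplit : (n - start).toNat = (p.2 - start).toNat + (n - p.2).toNat := by omega
      rw [hsplit, List.range_add, List.map_append]
      congr 1
      · -- the first run is constant v
        apply List.ext_getElem (by simp)
        intro i h1 h2
        simp only [List.getElem_replicate, List.getElem_map, List.getElem_range]
        have hi : i < (p.2 - start).toNat := by simpa using h1
        have hle1 : start ≤ start + (i : Int) := by omega
        have hle2 : start + (i : Int) ≤ p.1 := by omega
        have hA := hm start (start + (i : Int)) h0 hle1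
        have hB := hm (start + (i : Int)) p.1 (by omega) hle2
        omega
      · -- the tail, re-indexed from p.2
        rw [List.map_map]
        apply List.map_congr_left
        intro j hj
        simp only [Function.comp_apply]
        congr 1
        push_cast
        omega
    · rw [if_neg hlt]
      simp [show (n - start).toNat = 0 by omega]

theorem pvBuildRow_eq (inc : ℚ) (n : Int)
    (hm : ∀ a b : Int, 0 ≤ a → a ≤ b → pvLevel inc a ≤ pvLevel inc b)
    (start : Int) (h0 : 0 ≤ start) :
    pvBuildRow inc n start
      = (List.range (n - start).toNat).map (fun (j : ℕ) => pvLevel inc (start + (j : Int))) :=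
  pvBuildRowF_eq inc n hm (n - start).toNat start h0 le_rfl

-- ===== VERDICT (by name: the statement is the Claim_ definition above) =====
theorem generate_petri_dish_spec : Claim_equal_generate_petri_dish := by
  intro n _
  unfold Spec_generate_petri_dish generate_petri_dish generate_petri_dish_alt
  by_cases h : n ≤ 0
  · simp [h]
  · simp only [h, if_false]
    set inc : ℚ := if n > 1 then pvFl (4 / ((n:ℚ) - 1)) else 0 with hinc
    have hinc0 : 0 ≤ inc := by
      rw [hinc]
      split_ifs with h1
      · apply pvFl_nonneg
        have : (0:ℚ) < (n:ℚ) - 1 := by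
          have : (1:ℤ) < n := h1
          have : (1:ℚ) < (n:ℚ) := by exact_mod_cast this
          linarith
        positivity
      · exact le_refl 0
    have hrow : pvBuildRow inc n 0
        = (List.range n.toNat).map (fun (j : ℕ) => pvRNE (pvFl (pvFl ((j:ℚ) * inc) + 1))) := by
      rw [pvBuildRow_eq inc n (fun a b ha hab => pvLevel_mono hinc0 ha hab) 0 le_rfl]
      have : (n - 0).toNat = n.toNat := by omega
      rw [this]
      apply List.map_congr_left
      intro j hj
      simp only [pvLevel, zero_add]
      norm_cast
    rw [hrow, PySem.List.pyRange_zero]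
    simp only [List.foldl_map, PySem.List.pySetD_natCast, PySem.List.pyGetD_natCast]
    simp only [List.map_map, Function.comp_def]
    simp only [Int.cast_natCast]
    exact pvMain (fun j => pvRNE (pvFl (pvFl ((j : ℚ) * inc) + 1))) n.toNat
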